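-- pv_equiv track=rewrite | github.com/Linhkobe/Crossword | Backend/process_definition_image.py | process_filtered_lines
-- ===== SOURCE A (Python) =====
-- def process_filtered_lines(filtered_lines):
--     horiz_definitions = {}
--     vert_definitions = {}
--
--     current_section = None
--     current_lines = []
--
--     vert_key_index = 0
--     vert_keys = 'ABCDEFGHIJ'
--
--     horiz_key_index = 1
--
--     for line in filtered_lines:
--         if "HORIZONTALEMENT" in line:
--             current_section = "horizontal"
--             current_lines = []
--             continue
--         elif "VERTICALEMENT" in line:
--             current_section = "vertical"
--             current_lines = []
--             continue
--
--         if current_section == "horizontal":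
--             horiz_definitions[str(horiz_key_index)] = line.strip()
--             horiz_key_index += 1
--         elif current_section == "vertical":
--             if vert_key_index < len(vert_keys):
--                 vert_definitions[vert_keys[vert_key_index]] = line.strip()
--                 vert_key_index += 1
--
--     return {'HORIZONTALEMENT': horiz_definitions, 'VERTICALEMENT': vert_definitions}
-- ===== SOURCE B (Python) =====
-- def _marker(line):
--     if "HORIZONTALEMENT" in line:
--         return "H"
--     if "VERTICALEMENT" in line:
--         return "V"
--     return None
--
-- def process_filtered_lines(filtered_lines):
--     # Phase 1: locate all marker lines and their kinds.
--     marks = [(j, k) for j, k in enumerate(map(_marker, filtered_lines)) if k is not None]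
--     # Phase 2: each marker owns the segment up to the next marker (or the end).
--     ends = [j for j, _ in marks[1:]] + [len(filtered_lines)]
--     horiz, vert = [], []
--     for (j, k), e in zip(marks, ends):
--         seg = [line.strip() for line in filtered_lines[j + 1:e]]
--         (horiz if k == "H" else vert).extend(seg)
--     # Phase 3: build the dicts from the gathered lists.
--     return {'HORIZONTALEMENT': {str(i): d for i, d in enumerate(horiz, 1)},
--             'VERTICALEMENT': dict(zip('ABCDEFGHIJ', vert))}
-- ===== Notes on version B (the rewrite author's own statement) =====
-- stated objective: alternative
-- what changed: A is a single stateful forward pass that mutates two dicts and two key counters while tracking the current section; B is a three-phase segmentation: first locate every marker line and its kind, then pair each marker position with the next marker position (or the end) and slice out the segment of stripped lines it owns, and finally build the dicts from the two gathered lists (enumerate for '1','2',... and zip with 'ABCDEFGHIJ' for the 10-entry vertical cap).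
import Mathlib
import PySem

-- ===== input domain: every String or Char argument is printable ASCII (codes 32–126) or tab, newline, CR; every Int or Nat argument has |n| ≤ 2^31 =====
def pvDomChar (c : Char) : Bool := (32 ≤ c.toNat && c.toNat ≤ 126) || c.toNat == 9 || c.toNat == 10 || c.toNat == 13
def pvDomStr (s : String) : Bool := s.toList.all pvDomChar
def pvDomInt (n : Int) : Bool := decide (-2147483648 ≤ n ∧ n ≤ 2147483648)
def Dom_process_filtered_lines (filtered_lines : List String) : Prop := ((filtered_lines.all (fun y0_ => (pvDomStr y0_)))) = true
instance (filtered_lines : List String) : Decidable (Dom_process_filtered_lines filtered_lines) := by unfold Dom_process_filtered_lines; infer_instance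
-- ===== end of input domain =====

-- B replaces A's stateful forward pass (two dicts, two key counters, a current-section
-- variable) by a three-phase segmentation: locate every marker line, slice out the segment
-- each marker owns (up to the next marker), then build the dicts from the gathered lists.
-- Objective: alternative (not faster).

-- ===== PORT A =====
-- loop body of A; state = (horiz_definitions, vert_definitions, current_section, vert_key_index, horiz_key_index).
-- A's variable current_lines is written but never read, so it is not part of the state.
def pflStepA (st : PySem.Dict String String × PySem.Dict String String × Option String × Int × Int)
    (line : String) : PySem.Dict String String × PySem.Dict String String × Option String × Int × Int :=
  let (hd, vd, sec, vki, hki) := st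
  if PySem.Str.isIn "HORIZONTALEMENT" line then
    (hd, vd, some "horizontal", vki, hki)
  else if PySem.Str.isIn "VERTICALEMENT" line then
    (hd, vd, some "vertical", vki, hki)
  else if sec == some "horizontal" then
    (hd.insert (PySem.Int.toStr hki) (PySem.Str.strip line), vd, sec, vki, hki + 1)
  else if sec == some "vertical" then
    if vki < PySem.Str.len "ABCDEFGHIJ" then
      match PySem.Str.pyGet? "ABCDEFGHIJ" vki with   -- in range: 0 ≤ vki < 10 under the guard
      | some c => (hd, vd.insert (String.ofList [c]) (PySem.Str.strip line), sec, vki + 1, hki)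
      | none   => (hd, vd, sec, vki, hki)
    else (hd, vd, sec, vki, hki)
  else (hd, vd, sec, vki, hki)

def process_filtered_lines (filtered_lines : List String) : List (String × List (String × String)) :=
  let st := filtered_lines.foldl pflStepA (⟨[]⟩, ⟨[]⟩, none, 0, 1)
  [("HORIZONTALEMENT", st.1.items), ("VERTICALEMENT", st.2.1.items)]

-- ===== PORT B =====
-- helper _marker of Source B
def pflMarker (line : String) : Option String :=
  if PySem.Str.isIn "HORIZONTALEMENT" line then some "H"
  else if PySem.Str.isIn "VERTICALEMENT" line then some "V"
  else none

-- phase 1 of Source B: marks = [(j, k) for j, k in enumerate(map(_marker, filtered_lines)) if k is not None]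
def pflMarks (filtered_lines : List String) : List (Int × Option String) :=
  (PySem.List.enumerate (filtered_lines.map pflMarker) 0).filter (fun p => p.2.isSome)

-- phase 2 of Source B: ends = [j for j, _ in marks[1:]] + [len(filtered_lines)]
def pflEnds (filtered_lines : List String) : List Int :=
  ((pflMarks filtered_lines).drop 1).map (fun p => p.1) ++ [(filtered_lines.length : Int)]

-- body of Source B's segment loop: slice the segment and extend the chosen list
def pflSegStep (filtered_lines : List String) (st : List String × List String)
    (pe : (Int × Option String) × Int) : List String × List String :=
  let seg := (PySem.List.slice filtered_lines (some (pe.1.1 + 1)) (some pe.2)).map PySem.Str.strip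
  if pe.1.2 == some "H" then (st.1 ++ seg, st.2) else (st.1, st.2 ++ seg)

def pflSeg (filtered_lines : List String) : List String × List String :=
  ((pflMarks filtered_lines).zip (pflEnds filtered_lines)).foldl
    (pflSegStep filtered_lines) ([], [])

def process_filtered_lines_alt (filtered_lines : List String) : List (String × List (String × String)) :=
  let hv := pflSeg filtered_lines
  -- phase 3: the dict comprehension / dict(zip …): all keys are pairwise distinct, so the assoc list is exact
  [("HORIZONTALEMENT", (PySem.List.enumerate hv.1 1).map (fun p => (PySem.Int.toStr p.1, p.2))),
   ("VERTICALEMENT", (List.zip "ABCDEFGHIJ".toList hv.2).map (fun p => (String.ofList [p.1], p.2)))]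

-- ===== PRECONDITION & SPEC =====
def Spec_process_filtered_lines (filtered_lines : List String) (out : List (String × List (String × String))) : Prop := out = process_filtered_lines_alt filtered_lines
instance (filtered_lines : List String) (out : List (String × List (String × String))) : Decidable (Spec_process_filtered_lines filtered_lines out) := by unfold Spec_process_filtered_lines; infer_instance

-- ===== CLAIM (what is proved, stated in full; the proofs are below) =====
def Claim_equal_process_filtered_lines : Prop := ∀ (filtered_lines : List String), Dom_process_filtered_lines filtered_lines → Spec_process_filtered_lines filtered_lines (process_filtered_lines filtered_lines)

-- ===== LEMMAS AND PROOFS =====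

-- decoding of decimal digit strings, inverse of Nat.toDigits 10
def pflDec (cs : List Char) : Nat := cs.foldl (fun a c => a * 10 + (c.toNat - 48)) 0

lemma pfl_tdc_append : ∀ (f n : Nat) (acc : List Char),
    Nat.toDigitsCore 10 f n acc = Nat.toDigitsCore 10 f n [] ++ acc := by
  intro f
  induction f with
  | zero => intro n acc; simp [Nat.toDigitsCore]
  | succ f ih =>
    intro n acc
    simp only [Nat.toDigitsCore]
    by_cases h : n / 10 = 0
    · simp [h]
    · simp only [h, if_false]
      rw [ih (n / 10) (Nat.digitChar (n % 10) :: acc), ih (n / 10) [Nat.digitChar (n % 10)]]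
      simp

lemma pfl_digitChar_val (m : Nat) (h : m < 10) : (Nat.digitChar m).toNat - 48 = m := by
  interval_cases m <;> decide

lemma pfl_dec_toDigitsCore : ∀ (f n : Nat), n < f →
    pflDec (Nat.toDigitsCore 10 f n []) = n := by
  intro f
  induction f with
  | zero => omega
  | succ f ih =>
    intro n hn
    simp only [Nat.toDigitsCore]
    by_cases h : n / 10 = 0
    · simp [h, pflDec, pfl_digitChar_val (n % 10) (by omega)]
      omega
    · simp only [h, if_false]
      rw [pfl_tdc_append]
      unfold pflDec
      rw [List.foldl_append]
      have hlt : n / 10 < f := by omega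
      have := ih (n / 10) hlt
      unfold pflDec at this
      rw [this]
      simp [pfl_digitChar_val (n % 10) (by omega)]
      omega

lemma pfl_toDigits_inj (m n : Nat) (h : Nat.toDigits 10 m = Nat.toDigits 10 n) : m = n := by
  have hm := pfl_dec_toDigitsCore (m + 1) m (by omega)
  have hn := pfl_dec_toDigitsCore (n + 1) n (by omega)
  unfold Nat.toDigits at h
  rw [h] at hm
  omega

lemma pfl_toStr_inj_nonneg (a b : Int) (ha : 0 ≤ a) (hb : 0 ≤ b)
    (h : PySem.Int.toStr a = PySem.Int.toStr b) : a = b := by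
  unfold PySem.Int.toStr at h
  have h2 : PySem.Int.toChars a = PySem.Int.toChars b := by
    have := congrArg String.toList h
    simpa using this
  unfold PySem.Int.toChars at h2
  rw [if_neg (by omega), if_neg (by omega)] at h2
  have := pfl_toDigits_inj a.toNat b.toNat h2
  omega

-- the two dict builders of B
def pflHEnum (hl : List String) : List (String × String) :=
  (PySem.List.enumerate hl 1).map (fun p => (PySem.Int.toStr p.1, p.2))

def pflVZip (vl : List String) : List (String × String) :=
  (List.zip "ABCDEFGHIJ".toList vl).map (fun p => (String.ofList [p.1], p.2))

-- intermediate list-collecting fold used only by the proof; state = (horizontal, vertical, section)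
def pflStepB (st : List String × List String × Option String) (line : String) :
    List String × List String × Option String :=
  let (h, v, sec) := st
  if PySem.Str.isIn "HORIZONTALEMENT" line then (h, v, some "horizontal")
  else if PySem.Str.isIn "VERTICALEMENT" line then (h, v, some "vertical")
  else if sec == some "horizontal" then (h ++ [PySem.Str.strip line], v, sec)
  else if sec == some "vertical" then (h, v ++ [PySem.Str.strip line], sec)
  else (h, v, sec)

-- A-state determined by list-collecting state
def pflStA (t : List String × List String × Option String) :
    PySem.Dict String String × PySem.Dict String String × Option String × Int × Int :=
  (⟨pflHEnum t.1⟩, ⟨pflVZip t.2.1⟩, t.2.2, ((min t.2.1.length 10 : Nat) : Int), (t.1.length : Int) + 1)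

lemma pfl_insert_fresh {ν : Type} (items : List (String × ν)) (k : String) (v : ν)
    (h : ∀ p ∈ items, p.1 ≠ k) :
    (⟨items⟩ : PySem.Dict String ν).insert k v = ⟨items ++ [(k, v)]⟩ := by
  have hc : (⟨items⟩ : PySem.Dict String ν).contains k = false := by
    simp only [PySem.Dict.contains, List.any_eq_false]
    intro p hp
    simpa using h p hp
  unfold PySem.Dict.insert
  rw [hc]
  simp

lemma pfl_hEnum_append (hl : List String) (s : String) :
    pflHEnum (hl ++ [s]) = pflHEnum hl ++ [(PySem.Int.toStr ((hl.length : Int) + 1), s)] := by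
  unfold pflHEnum
  rw [PySem.List.enumerate_append]
  simp [PySem.List.enumerate_cons, PySem.List.enumerate_nil, add_comm]

lemma pfl_hEnum_fresh (hl : List String) :
    ∀ p ∈ pflHEnum hl, p.1 ≠ PySem.Int.toStr ((hl.length : Int) + 1) := by
  intro p hp
  unfold pflHEnum at hp
  simp only [List.mem_map] at hp
  obtain ⟨q, hq, rfl⟩ := hp
  rw [PySem.List.mem_enumerate_iff] at hq
  obtain ⟨k, hk, rfl⟩ := hq
  intro hcontra
  have := pfl_toStr_inj_nonneg (1 + k) ((hl.length : Int) + 1) (by omega) (by omega) hcontra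
  omega

lemma pfl_zip_fst {α : Type} : ∀ (ks : List Char) (vl : List α),
    (List.zip ks vl).map Prod.fst = ks.take vl.length := by
  intro ks
  induction ks with
  | nil => intro vl; simp
  | cons k ks ih =>
    intro vl
    cases vl with
    | nil => simp
    | cons v vl => simp [ih vl]

lemma pfl_zip_append_lt {α : Type} : ∀ (ks : List Char) (vl : List α) (s : α)
    (h : vl.length < ks.length),
    List.zip ks (vl ++ [s]) = List.zip ks vl ++ [(ks[vl.length], s)] := by
  intro ks
  induction ks with
  | nil => intro vl s h; simp at h
  | cons k ks ih =>
    intro vl s h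
    cases vl with
    | nil => simp
    | cons v vl =>
      simp only [List.cons_append, List.zip_cons_cons, List.length_cons]
      rw [ih vl s (by simpa using h)]
      simp

lemma pfl_zip_append_ge {α : Type} : ∀ (ks : List Char) (vl : List α) (s : α)
    (h : ks.length ≤ vl.length), List.zip ks (vl ++ [s]) = List.zip ks vl := by
  intro ks
  induction ks with
  | nil => intro vl s _; simp
  | cons k ks ih =>
    intro vl s h
    cases vl with
    | nil => simp at h
    | cons v vl =>
      simp only [List.cons_append, List.zip_cons_cons]
      rw [ih vl s (by simpa using h)]

lemma pfl_keys_nodup_prefix : ∀ (n : Nat) (hn : n < 10),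
    ("ABCDEFGHIJ".toList[n]'(by simp; omega)) ∉ "ABCDEFGHIJ".toList.take n := by
  decide

lemma pfl_vZip_append_lt (vl : List String) (s : String) (h : vl.length < 10) :
    pflVZip (vl ++ [s]) = pflVZip vl ++ [(String.ofList [("ABCDEFGHIJ".toList[vl.length]'(by simp; omega))], s)] := by
  unfold pflVZip
  rw [pfl_zip_append_lt "ABCDEFGHIJ".toList vl s (by simp; omega)]
  simp

lemma pfl_vZip_append_ge (vl : List String) (s : String) (h : 10 ≤ vl.length) :
    pflVZip (vl ++ [s]) = pflVZip vl := by
  unfold pflVZip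
  rw [pfl_zip_append_ge "ABCDEFGHIJ".toList vl s (by simp; omega)]

lemma pfl_vZip_fresh (vl : List String) (h : vl.length < 10) :
    ∀ p ∈ pflVZip vl, p.1 ≠ String.ofList [("ABCDEFGHIJ".toList[vl.length]'(by simp; omega))] := by
  intro p hp
  unfold pflVZip at hp
  simp only [List.mem_map] at hp
  obtain ⟨q, hq, rfl⟩ := hp
  have hfst : q.1 ∈ (List.zip "ABCDEFGHIJ".toList vl).map Prod.fst := List.mem_map_of_mem hq
  rw [pfl_zip_fst] at hfst
  intro hcontra
  have hc : q.1 = "ABCDEFGHIJ".toList[vl.length]'(by simp; omega) := by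
    have := congrArg String.toList hcontra
    simpa using this
  rw [hc] at hfst
  exact pfl_keys_nodup_prefix vl.length h hfst

lemma pfl_step_eq (st : List String × List String × Option String) (line : String) :
    pflStepA (pflStA st) line = pflStA (pflStepB st line) := by
  obtain ⟨hl, vl, sec⟩ := st
  simp only [pflStepA, pflStepB, pflStA]
  by_cases h1 : PySem.Str.isIn "HORIZONTALEMENT" line = true
  · simp only [if_pos h1]
  simp only [if_neg h1]
  by_cases h2 : PySem.Str.isIn "VERTICALEMENT" line = true
  · simp only [if_pos h2]
  simp only [if_neg h2]
  by_cases h3 : (sec == some "horizontal") = true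
  · simp only [if_pos h3]
    rw [pfl_insert_fresh (pflHEnum hl) _ _ (pfl_hEnum_fresh hl)]
    refine Prod.ext ?_ (Prod.ext rfl (Prod.ext rfl (Prod.ext rfl ?_)))
    · exact (congrArg PySem.Dict.mk (pfl_hEnum_append hl _)).symm
    · simp
  simp only [if_neg h3]
  by_cases h4 : (sec == some "vertical") = true
  · simp only [if_pos h4]
    by_cases hlen : vl.length < 10
    · have hguard : ((min vl.length 10 : Nat) : Int) < PySem.Str.len "ABCDEFGHIJ" := by
        have h10 : PySem.Str.len "ABCDEFGHIJ" = 10 := by decide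
        rw [h10]; omega
      simp only [if_pos hguard]
      have hget : PySem.Str.pyGet? "ABCDEFGHIJ" ((min vl.length 10 : Nat) : Int)
          = some ("ABCDEFGHIJ".toList[vl.length]'(by simp; omega)) := by
        have hmin : ((min vl.length 10 : Nat) : Int) = ((vl.length : Nat) : Int) := by omega
        rw [hmin, PySem.Str.pyGet?_natCast]
        exact List.getElem?_eq_getElem _
      simp only [hget]
      rw [pfl_insert_fresh (pflVZip vl) _ _ (pfl_vZip_fresh vl hlen)]
      refine Prod.ext rfl (Prod.ext ?_ (Prod.ext rfl (Prod.ext ?_ rfl)))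
      · exact (congrArg PySem.Dict.mk (pfl_vZip_append_lt vl _ hlen)).symm
      · simp; omega
    · have hguard : ¬ (((min vl.length 10 : Nat) : Int) < PySem.Str.len "ABCDEFGHIJ") := by
        have h10 : PySem.Str.len "ABCDEFGHIJ" = 10 := by decide
        rw [h10]; omega
      simp only [if_neg hguard]
      refine Prod.ext rfl (Prod.ext ?_ (Prod.ext rfl (Prod.ext ?_ rfl)))
      · exact (congrArg PySem.Dict.mk (pfl_vZip_append_ge vl _ (by omega))).symm
      · simp; omega
  simp only [if_neg h4]

lemma pfl_fold_eq : ∀ (lines : List String) (st : List String × List String × Option String),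
    lines.foldl pflStepA (pflStA st) = pflStA (lines.foldl pflStepB st) := by
  intro lines
  induction lines with
  | nil => intro st; rfl
  | cons l ls ih =>
    intro st
    simp only [List.foldl_cons]
    rw [pfl_step_eq st l]
    exact ih (pflStepB st l)

-- ===== bridge: the list-collecting fold equals the segment computation =====

lemma pfl_marker_cases (line : String) :
    pflMarker line = none ∨ pflMarker line = some "H" ∨ pflMarker line = some "V" := by
  unfold pflMarker
  split_ifs <;> simp

lemma pfl_isInH_of_marker_H (x : String) (hm : pflMarker x = some "H") :
    PySem.Str.isIn "HORIZONTALEMENT" x = true := by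
  unfold pflMarker at hm
  by_contra hh
  simp only [Bool.not_eq_true] at hh
  rw [hh] at hm
  simp only [Bool.false_eq_true, if_false] at hm
  split_ifs at hm <;> simp_all

lemma pfl_isInH_false_of_marker_ne_H (x : String) (hm : pflMarker x ≠ some "H") :
    PySem.Str.isIn "HORIZONTALEMENT" x = false := by
  by_contra hh
  simp only [Bool.not_eq_false] at hh
  unfold pflMarker at hm
  rw [hh] at hm
  simp at hm

lemma pfl_isInV_of_marker_V (x : String) (hm : pflMarker x = some "V") :
    PySem.Str.isIn "VERTICALEMENT" x = true := by
  unfold pflMarker at hm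
  by_contra hh
  simp only [Bool.not_eq_true] at hh
  rw [hh] at hm
  split_ifs at hm <;> simp_all

lemma pfl_isInV_false_of_marker_none (x : String) (hm : pflMarker x = none) :
    PySem.Str.isIn "VERTICALEMENT" x = false := by
  by_contra hh
  simp only [Bool.not_eq_false] at hh
  unfold pflMarker at hm
  rw [hh] at hm
  split_ifs at hm <;> simp_all

-- shape of the members of pflMarks
lemma pfl_marks_mem (ls : List String) (p : Int × Option String) (hp : p ∈ pflMarks ls) :
    (p.2 = some "H" ∨ p.2 = some "V") ∧ ∃ k : Nat, k < ls.length ∧ p.1 = (k : Int) := by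
  unfold pflMarks at hp
  rw [List.mem_filter] at hp
  obtain ⟨hmem, hsome⟩ := hp
  rw [PySem.List.mem_enumerate_iff] at hmem
  obtain ⟨k, hk, hpk⟩ := hmem
  subst hpk
  simp only [List.getElem_map] at hsome ⊢
  constructor
  · rcases pfl_marker_cases (ls[k]'(by simpa using hk)) with h | h | h
    · rw [h] at hsome; simp at hsome
    · left; simpa using h
    · right; simpa using h
  · exact ⟨k, by simpa using hk, by simp⟩

lemma pfl_marks_append (ls : List String) (x : String) :
    pflMarks (ls ++ [x]) = pflMarks ls ++
      (if (pflMarker x).isSome then [((ls.length : Int), pflMarker x)] else []) := by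
  unfold pflMarks
  rw [List.map_append, PySem.List.enumerate_append, List.filter_append]
  congr 1
  simp only [List.map_cons, List.map_nil, List.length_map, PySem.List.enumerate_cons,
    PySem.List.enumerate_nil, zero_add]
  cases h : pflMarker x <;> simp

-- slice stability: segments whose end lies inside ls are unaffected by appending x
lemma pfl_slice_stable (ls : List String) (x : String) (a b : Nat) (hb : b ≤ ls.length) :
    PySem.List.slice (ls ++ [x]) (some (a : Int)) (some (b : Int))
      = PySem.List.slice ls (some (a : Int)) (some (b : Int)) := by
  rw [PySem.List.slice_natCast, PySem.List.slice_natCast]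
  by_cases ha : a ≤ ls.length
  · rw [List.drop_append_of_le_length ha,
      List.take_append_of_le_length (by simp; omega)]
  · rw [List.drop_eq_nil_of_le (show ls.length ≤ a by omega),
      List.drop_eq_nil_of_le (show (ls ++ [x]).length ≤ a by simp; omega)]

-- the final segment grows by x when a non-marker line is appended
lemma pfl_slice_grow (ls : List String) (x : String) (j : Nat) (hj : j + 1 ≤ ls.length) :
    PySem.List.slice (ls ++ [x]) (some ((j : Int) + 1)) (some ((ls.length : Int) + 1))
      = PySem.List.slice ls (some ((j : Int) + 1)) (some (ls.length : Int)) ++ [x] := by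
  have h1 : ((j : Int) + 1) = ((j + 1 : Nat) : Int) := by push_cast; ring
  have h2 : ((ls.length : Int) + 1) = ((ls.length + 1 : Nat) : Int) := by push_cast; ring
  rw [h1, h2, PySem.List.slice_natCast, PySem.List.slice_natCast,
    List.drop_append_of_le_length hj]
  rw [List.take_of_length_le (by simp; omega)]
  rw [List.take_of_length_le (le_of_eq (by simp))]

-- empty final segment of a freshly appended marker
lemma pfl_slice_empty (ys : List String) (n : Nat) :
    PySem.List.slice ys (some ((n : Int) + 1)) (some ((n : Int) + 1)) = [] := by
  have h1 : ((n : Int) + 1) = ((n + 1 : Nat) : Int) := by push_cast; ring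
  rw [h1, PySem.List.slice_natCast]
  simp

-- bounds of the entries of pflEnds, minus its final entry
lemma pfl_endsFront_mem (ls : List String) (e : Int)
    (he : e ∈ ((pflMarks ls).drop 1).map (fun p => p.1)) :
    ∃ b : Nat, b ≤ ls.length ∧ e = (b : Int) := by
  rw [List.mem_map] at he
  obtain ⟨p, hp, rfl⟩ := he
  obtain ⟨-, k, hk, hpk⟩ := pfl_marks_mem ls p (List.mem_of_mem_drop hp)
  exact ⟨k, by omega, hpk⟩

-- the segment fold ignores the appended line x on pairs whose end is ≤ ls.length
lemma pfl_segfold_stable (ls : List String) (x : String)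
    (pairs : List ((Int × Option String) × Int)) (st : List String × List String)
    (h : ∀ q ∈ pairs, ∃ (a b : Nat), b ≤ ls.length ∧ q.1.1 = (a : Int) ∧ q.2 = (b : Int)) :
    pairs.foldl (pflSegStep (ls ++ [x])) st = pairs.foldl (pflSegStep ls) st := by
  apply PySem.List.foldl_congr_mem
  intro acc q hq
  obtain ⟨a, b, hb, hqa, hqb⟩ := h q hq
  unfold pflSegStep
  rw [hqa, hqb]
  have h1 : ((a : Int) + 1) = ((a + 1 : Nat) : Int) := by push_cast; ring
  rw [h1, pfl_slice_stable ls x (a + 1) b hb]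

-- decomposition of the zipped (marks, ends) list at its last element
lemma pfl_pairs_concat (ms : List (Int × Option String)) (lp : Int × Option String) (e : Int) :
    (ms ++ [lp]).zip (((ms ++ [lp]).drop 1).map (fun p => p.1) ++ [e])
      = ms.zip (((ms ++ [lp]).drop 1).map (fun p => p.1)) ++ [(lp, e)] := by
  rw [List.zip_append (by simp)]
  simp

-- the front ends of ms ++ [lp] are the front ends of ms followed by lp.1
lemma pfl_front_ends (ms : List (Int × Option String)) (lp : Int × Option String) :
    ms.zip (((ms ++ [lp]).drop 1).map (fun p => p.1))
      = ms.zip ((ms.drop 1).map (fun p => p.1) ++ [lp.1]) := by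
  cases ms with
  | nil => simp
  | cons a t => simp

-- membership bounds for all pairs built from the marks of ls with final end ls.length
lemma pfl_all_bounds (ls : List String) (ends : List Int)
    (hends : ∀ e ∈ ends, ∃ b : Nat, b ≤ ls.length ∧ e = (b : Int)) :
    ∀ q ∈ (pflMarks ls).zip ends,
      ∃ (a b : Nat), b ≤ ls.length ∧ q.1.1 = (a : Int) ∧ q.2 = (b : Int) := by
  intro q hq
  obtain ⟨hq1, hq2⟩ := List.of_mem_zip hq
  obtain ⟨-, a, ha, hqa⟩ := pfl_marks_mem ls q.1 hq1
  obtain ⟨b, hb, hqb⟩ := hends q.2 hq2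
  exact ⟨a, b, hb, hqa, hqb⟩

lemma pfl_ends_bounds (ls : List String) :
    ∀ e ∈ ((pflMarks ls).drop 1).map (fun p => p.1) ++ [(ls.length : Int)],
      ∃ b : Nat, b ≤ ls.length ∧ e = (b : Int) := by
  intro e he
  rcases List.mem_append.mp he with h | h
  · exact pfl_endsFront_mem ls e h
  · exact ⟨ls.length, le_refl _, by simpa using h⟩

-- appending a marker line leaves the gathered segments unchanged
lemma pfl_seg_marker (ls : List String) (x : String) (m : String)
    (hm : pflMarker x = some m) : pflSeg (ls ++ [x]) = pflSeg ls := by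
  have hmarks : pflMarks (ls ++ [x]) = pflMarks ls ++ [((ls.length : Int), some m)] := by
    rw [pfl_marks_append, hm]; simp
  unfold pflSeg pflEnds
  rw [hmarks, pfl_pairs_concat, pfl_front_ends, List.foldl_append]
  rw [pfl_segfold_stable ls x _ _ (pfl_all_bounds ls _ (pfl_ends_bounds ls))]
  show pflSegStep (ls ++ [x]) _ _ = _
  unfold pflSegStep
  have hlen : ((ls ++ [x]).length : Int) = (ls.length : Int) + 1 := by
    simp
  simp only [hlen, pfl_slice_empty]
  split_ifs <;> simp

-- ===== the invariant =====
-- the segment computation equals the first two components of the list-collecting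
-- fold, and the fold's section is the kind of the last marker
lemma pfl_seg_eq : ∀ (ls : List String),
    pflSeg ls = ((ls.foldl pflStepB ([], [], none)).1, (ls.foldl pflStepB ([], [], none)).2.1) ∧
    (ls.foldl pflStepB ([], [], none)).2.2 =
      (pflMarks ls).getLast?.map (fun p => if p.2 == some "H" then "horizontal" else "vertical") := by
  intro ls
  induction ls using List.reverseRecOn with
  | nil => constructor <;> rfl
  | append_singleton ls x ih =>
    obtain ⟨ihA, ihB⟩ := ih
    rcases hT : ls.foldl pflStepB ([], [], none) with ⟨t1, t2, t3⟩
    rw [hT] at ihA ihB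
    dsimp only at ihA ihB
    have hfold : (ls ++ [x]).foldl pflStepB ([], [], none) = pflStepB (t1, t2, t3) x := by
      rw [List.foldl_append, hT]; rfl
    rcases pfl_marker_cases x with hm | hm | hm
    · -- x is not a marker: it joins the final segment (if any)
      have hmarks : pflMarks (ls ++ [x]) = pflMarks ls := by
        rw [pfl_marks_append, hm]; simp
      have hB1 := pfl_isInH_false_of_marker_ne_H x (by rw [hm]; simp)
      have hB2 := pfl_isInV_false_of_marker_none x hm
      rcases List.eq_nil_or_concat (pflMarks ls) with hnil | ⟨ms, lp, hms⟩
      · have hsec : t3 = none := by rw [ihB, hnil]; rfl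
        have hseg : pflSeg ls = ([], []) := by
          unfold pflSeg
          rw [hnil]; rfl
        rw [hseg] at ihA
        rw [hfold]
        simp only [pflStepB, hB1, hB2, Bool.false_eq_true, if_false, hsec,
          show ((none : Option String) == some "horizontal") = false from rfl,
          show ((none : Option String) == some "vertical") = false from rfl]
        constructor
        · unfold pflSeg
          rw [hmarks, hnil]
          simp only [List.zip_nil_left, List.foldl_nil]
          exact ihA
        · rw [hmarks, hnil]
          simp
      · rw [List.concat_eq_append] at hms
        obtain ⟨hkind, j, hj, hlpj⟩ := pfl_marks_mem ls lp (by rw [hms]; simp)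
        have hlast : (pflMarks ls).getLast? = some lp := by rw [hms]; simp
        have hlen : ((ls ++ [x]).length : Int) = (ls.length : Int) + 1 := by simp
        -- both folds decompose at the last pair
        have hsegold : pflSeg ls
            = pflSegStep ls ((ms.zip (((pflMarks ls).drop 1).map (fun p => p.1))).foldl
                (pflSegStep ls) ([], [])) (lp, (ls.length : Int)) := by
          unfold pflSeg pflEnds
          conv_lhs => rw [hms]
          rw [show ((pflMarks ls).drop 1).map (fun p => p.1)
              = ((ms ++ [lp]).drop 1).map (fun p => p.1) from by rw [hms]]
          rw [pfl_pairs_concat, List.foldl_append]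
          rw [show ((ms ++ [lp]).drop 1).map (fun p => p.1)
              = ((pflMarks ls).drop 1).map (fun p => p.1) from by rw [hms]]
          rfl
        have hsegnew : pflSeg (ls ++ [x])
            = pflSegStep (ls ++ [x]) ((ms.zip (((pflMarks ls).drop 1).map (fun p => p.1))).foldl
                (pflSegStep ls) ([], [])) (lp, (ls.length : Int) + 1) := by
          unfold pflSeg pflEnds
          rw [hmarks, hlen]
          conv_lhs => rw [hms]
          rw [show ((pflMarks ls).drop 1).map (fun p => p.1)
              = ((ms ++ [lp]).drop 1).map (fun p => p.1) from by rw [hms]]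
          rw [pfl_pairs_concat, List.foldl_append]
          rw [show ((ms ++ [lp]).drop 1).map (fun p => p.1)
              = ((pflMarks ls).drop 1).map (fun p => p.1) from by rw [hms]]
          rw [pfl_segfold_stable ls x (ms.zip (((pflMarks ls).drop 1).map (fun p => p.1)))
            ([], []) ?hbound]
          case hbound =>
            intro q hq
            obtain ⟨hq1, hq2⟩ := List.of_mem_zip hq
            have hq1' : q.1 ∈ pflMarks ls := by rw [hms]; exact List.mem_append_left _ hq1
            obtain ⟨-, a, ha, hqa⟩ := pfl_marks_mem ls q.1 hq1'
            obtain ⟨b, hb, hqb⟩ := pfl_endsFront_mem ls q.2 hq2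
            exact ⟨a, b, hb, hqa, hqb⟩
          rfl
        have hgrow : (PySem.List.slice (ls ++ [x]) (some (lp.1 + 1)) (some ((ls.length : Int) + 1))).map PySem.Str.strip
            = (PySem.List.slice ls (some (lp.1 + 1)) (some (ls.length : Int))).map PySem.Str.strip
              ++ [PySem.Str.strip x] := by
          rw [hlpj, pfl_slice_grow ls x j (by omega)]
          simp
        rw [hfold]
        simp only [pflStepB, hB1, hB2, Bool.false_eq_true, if_false]
        rcases hkind with hk | hk
        · -- the last marker is horizontal: x goes to the horizontal list
          have hsec : t3 = some "horizontal" := by rw [ihB, hlast]; simp [hk]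
          rw [hsec]
          simp only [show ((some "horizontal" : Option String) == some "horizontal") = true from rfl,
            if_true]
          rw [hsegold] at ihA
          unfold pflSegStep at ihA
          simp only [hk, beq_self_eq_true, if_true] at ihA
          refine ⟨?_, ?_⟩
          · rw [hsegnew]
            unfold pflSegStep
            simp only [hk, beq_self_eq_true, if_true, hgrow]
            refine Prod.ext ?_ ?_
            · simp only [← List.append_assoc]
              exact congrArg (fun t => t.1 ++ [PySem.Str.strip x]) ihA
            · exact congrArg (fun t => t.2) ihA
          · rw [hmarks, hlast]
            simp [hk]
        · -- the last marker is vertical: x goes to the vertical list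
          have hsec : t3 = some "vertical" := by rw [ihB, hlast]; simp [hk]
          rw [hsec]
          simp only [show ((some "vertical" : Option String) == some "horizontal") = false from rfl,
            show ((some "vertical" : Option String) == some "vertical") = true from rfl,
            Bool.false_eq_true, if_false, if_true]
          rw [hsegold] at ihA
          unfold pflSegStep at ihA
          simp only [hk, show ((some "V" : Option String) == some "H") = false from rfl,
            Bool.false_eq_true, if_false] at ihA
          refine ⟨?_, ?_⟩
          · rw [hsegnew]
            unfold pflSegStep
            simp only [hk, show ((some "V" : Option String) == some "H") = false from rfl,
              Bool.false_eq_true, if_false, hgrow]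
            refine Prod.ext ?_ ?_
            · exact congrArg (fun t => t.1) ihA
            · simp only [← List.append_assoc]
              exact congrArg (fun t => t.2 ++ [PySem.Str.strip x]) ihA
          · rw [hmarks, hlast]
            simp [hk]
    · -- x is a HORIZONTALEMENT marker
      have hB1 := pfl_isInH_of_marker_H x hm
      have hmarks : pflMarks (ls ++ [x]) = pflMarks ls ++ [((ls.length : Int), some "H")] := by
        rw [pfl_marks_append, hm]; simp
      rw [hfold]
      simp only [pflStepB, hB1, if_true]
      refine ⟨?_, ?_⟩
      · rw [pfl_seg_marker ls x "H" hm, ihA]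
      · rw [hmarks]; simp
    · -- x is a VERTICALEMENT marker
      have hB1 := pfl_isInH_false_of_marker_ne_H x (by rw [hm]; simp)
      have hB2 := pfl_isInV_of_marker_V x hm
      have hmarks : pflMarks (ls ++ [x]) = pflMarks ls ++ [((ls.length : Int), some "V")] := by
        rw [pfl_marks_append, hm]; simp
      rw [hfold]
      simp only [pflStepB, hB1, Bool.false_eq_true, if_false, hB2, if_true]
      refine ⟨?_, ?_⟩
      · rw [pfl_seg_marker ls x "V" hm, ihA]
      · rw [hmarks]; simp

-- ===== VERDICT (by name: the statement is the Claim_ definition above) =====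
theorem process_filtered_lines_spec : Claim_equal_process_filtered_lines := by
  intro filtered_lines _
  unfold Spec_process_filtered_lines process_filtered_lines process_filtered_lines_alt
  have h0 : ((⟨[]⟩, ⟨[]⟩, none, 0, 1) : PySem.Dict String String × PySem.Dict String String × Option String × Int × Int)
      = pflStA (([], [], none) : List String × List String × Option String) := by
    simp [pflStA, pflHEnum, pflVZip, PySem.List.enumerate_nil]
  rw [h0, pfl_fold_eq]
  have h1 := (pfl_seg_eq filtered_lines).1
  rw [h1]
  rfl
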